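-- pv_equiv track=rewrite | github.com/jun-uen0/leetcode | py/medium/valid-sudoku.py | isContainSameNumInEveryCol
-- ===== SOURCE A (Python) =====
-- def isContainSameNumInEveryCol(board):
--   for i in range(len(board)):
--     temp = []
--     for _,v in enumerate(board):
--       if v[i] != '.':
--         temp.append(v[i])
--     if len(set(temp)) != len(temp):
--       return True
--   return False
-- ===== SOURCE B (Python) =====
-- def isContainSameNumInEveryCol(board):
--   counts = {}
--   for v in board:
--     for i in range(len(board)):
--       c = v[i]
--       if c != '.':
--         counts[(i, c)] = counts.get((i, c), 0) + 1
--   return any(n > 1 for n in counts.values())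
-- ===== Notes on version B (the rewrite author's own statement) =====
-- stated objective: alternative
-- what changed: B replaces A's column-major per-column scan (build temp list, compare len(set) vs len) by a single row-major pass that counts every non-dot cell in a dict keyed by (column, digit) and then checks whether any count exceeds 1.
-- outside the precondition, e.g. on isContainSameNumInEveryCol([['1', '1'], ['1']]): A returns True, B raises IndexError
import Mathlib
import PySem

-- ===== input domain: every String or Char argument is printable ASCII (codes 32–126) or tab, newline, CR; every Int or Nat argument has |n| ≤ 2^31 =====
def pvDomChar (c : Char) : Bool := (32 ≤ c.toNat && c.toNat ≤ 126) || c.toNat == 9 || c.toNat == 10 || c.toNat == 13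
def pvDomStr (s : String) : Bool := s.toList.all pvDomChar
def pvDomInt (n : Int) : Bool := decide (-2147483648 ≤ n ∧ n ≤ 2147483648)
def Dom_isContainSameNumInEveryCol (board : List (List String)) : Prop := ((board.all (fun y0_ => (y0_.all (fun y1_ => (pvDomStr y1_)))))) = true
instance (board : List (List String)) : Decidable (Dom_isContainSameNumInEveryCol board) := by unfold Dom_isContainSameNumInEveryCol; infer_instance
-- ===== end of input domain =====

-- B replaces A's column-major per-column duplicate test by a single row-major counting
-- pass over a dict keyed by (column, digit), checked globally (objective: alternative).

-- ===== PORT A =====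
-- v[i] with i from range(len(board)); exact when i < v.length, which Pre_ guarantees
def pvColGet (v : List String) (i : Nat) : String := PySem.List.pyGetD v (i : Int) ""

def isContainSameNumInEveryColGo (board : List (List String)) : List Nat → Bool
  | [] => false
  | i :: is =>
    let temp := board.foldl (fun acc v =>
      if pvColGet v i ≠ "." then acc ++ [pvColGet v i] else acc) []
    if (PySem.Set.ofList temp).length ≠ temp.length then true
    else isContainSameNumInEveryColGo board is

def isContainSameNumInEveryCol (board : List (List String)) : Bool :=
  isContainSameNumInEveryColGo board (List.range board.length)

-- ===== PORT B =====
-- counts[(i, c)] = counts.get((i, c), 0) + 1 for every non-'.' cell, row-major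
def altCountRow (n : Nat) (d : PySem.Dict (Int × String) Int) (v : List String) :
    PySem.Dict (Int × String) Int :=
  (List.range n).foldl (fun d i =>
    let c := pvColGet v i
    if c ≠ "." then d.insert ((i : Int), c) (d.getD ((i : Int), c) 0 + 1) else d) d

def isContainSameNumInEveryCol_alt (board : List (List String)) : Bool :=
  let counts := board.foldl (altCountRow board.length) PySem.Dict.empty
  counts.values.any (fun m => decide (1 < m))

-- ===== PRECONDITION & SPEC =====
-- Pre_ excludes ragged boards (some row shorter than the number of rows): there Python A
-- raises IndexError, except when a duplicate in an earlier column makes A return True first,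
-- while B's full counting pass always raises IndexError on such boards (cited in claim.json).
def Pre_isContainSameNumInEveryCol (board : List (List String)) : Prop :=
  ∀ v ∈ board, board.length ≤ v.length
instance (board : List (List String)) : Decidable (Pre_isContainSameNumInEveryCol board) := by unfold Pre_isContainSameNumInEveryCol; infer_instance
def pvWitness_isContainSameNumInEveryCol : List (List String) := [["1", "2"], [".", "2"]]

def Spec_isContainSameNumInEveryCol (board : List (List String)) (out : Bool) : Prop := out = isContainSameNumInEveryCol_alt board
instance (board : List (List String)) (out : Bool) : Decidable (Spec_isContainSameNumInEveryCol board out) := by unfold Spec_isContainSameNumInEveryCol; infer_instance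

-- ===== CLAIM (what is proved, stated in full; the proofs are below) =====
def Claim_equal_isContainSameNumInEveryCol : Prop := ∀ (board : List (List String)), Dom_isContainSameNumInEveryCol board → Pre_isContainSameNumInEveryCol board → Spec_isContainSameNumInEveryCol board (isContainSameNumInEveryCol board)

-- ===== LEMMAS AND PROOFS =====

-- the column-i values of the board, dots removed (the data both programs reason about)
def pvCol (board : List (List String)) (i : Nat) : List String :=
  (board.map (fun v => pvColGet v i)).filter (fun c => c ≠ ".")

-- the (column, digit) pairs contributed by one row
def pvPairs (n : Nat) (v : List String) : List (Int × String) :=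
  (List.range n).filterMap (fun i =>
    if pvColGet v i ≠ "." then some ((i : Int), pvColGet v i) else none)

-- all (column, digit) pairs of the board, row-major
def pvFlat (board : List (List String)) : List (Int × String) :=
  board.flatMap (pvPairs board.length)

-- ---- A's side: A = any column has a duplicate ----

-- A's inner foldl builds exactly pvCol
lemma pvTemp_eq_col (board : List (List String)) (i : Nat) (acc : List String) :
    board.foldl (fun acc v => if pvColGet v i ≠ "." then acc ++ [pvColGet v i] else acc) acc
      = acc ++ pvCol board i := by
  induction board generalizing acc with
  | nil => simp [pvCol]
  | cons v rest ih =>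
    simp only [List.foldl_cons]
    by_cases h : pvColGet v i = "."
    · rw [if_neg (by simpa using h), ih acc]
      simp [pvCol, h]
    · rw [if_pos (by simpa using h), ih (acc ++ [pvColGet v i])]
      simp [pvCol, h]

-- dedup length equals length iff no duplicates
lemma pvOfList_len (l : List String) :
    ((PySem.Set.ofList l).length = l.length) ↔ l.Nodup := by
  constructor
  · intro h
    have hnd : (PySem.Set.ofList l).Nodup := PySem.Set.nodup_ofList l
    have hsub : PySem.Set.ofList l ⊆ l := fun {x} hx => (PySem.Set.mem_ofList l x).1 hx
    have hperm : (PySem.Set.ofList l).Perm l :=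
      (hnd.subperm hsub).perm_of_length_le (le_of_eq h.symm)
    exact hperm.nodup_iff.mp hnd
  · intro h
    rw [PySem.Set.ofList_eq_self_of_nodup l h]

-- A's outer early-return loop is an 'any' of the per-column duplicate condition
lemma pvGo_eq_any (board : List (List String)) (is : List Nat) :
    isContainSameNumInEveryColGo board is
      = is.any (fun i => decide ¬ (pvCol board i).Nodup) := by
  induction is with
  | nil => rfl
  | cons i rest ih =>
    simp only [isContainSameNumInEveryColGo, List.any_cons]
    rw [pvTemp_eq_col board i []]
    simp only [List.nil_append]
    by_cases h : (pvCol board i).Nodup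
    · rw [if_neg (by simp [pvOfList_len, h]), ih]
      simp [h]
    · rw [if_pos (by simp [pvOfList_len, h])]
      simp [h]

-- ---- B's side: the counting fold is the counter of pvFlat ----

-- one row's inner loop is the plain counting fold over that row's pair list
lemma pvRow_eq_foldl_pairs (n : Nat) (v : List String) (d : PySem.Dict (Int × String) Int) :
    altCountRow n d v
      = (pvPairs n v).foldl (fun d k => d.insert k (d.getD k 0 + 1)) d := by
  unfold altCountRow pvPairs
  induction (List.range n) generalizing d with
  | nil => rfl
  | cons i is ih =>
    simp only [List.foldl_cons, List.filterMap_cons]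
    by_cases h : pvColGet v i = "."
    · simp only [h, ne_eq, not_true_eq_false, if_false]
      exact ih d
    · rw [if_pos (by simpa using h), if_pos (by simpa using h)]
      simp only [List.foldl_cons]
      exact ih _

-- the whole counting pass equals Counter(pvFlat)
lemma pvCounts_eq_counter (board : List (List String)) :
    board.foldl (altCountRow board.length) PySem.Dict.empty
      = PySem.Dict.counter (pvFlat board) := by
  rw [← PySem.Dict.foldl_insert_getD_add_one_eq_counter, pvFlat, List.foldl_flatMap]
  exact PySem.List.foldl_congr_mem board _ _ _
    (fun d v _ => pvRow_eq_foldl_pairs board.length v d)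

-- ---- the multiset link: counts in pvFlat are column counts ----

-- one row's pair list counts the pair (i, c) once iff that cell is c ≠ '.'
lemma pvPairs_count (v : List String) (n i : Nat) (c : String) :
    (pvPairs n v).count ((i : Int), c)
      = if i < n ∧ pvColGet v i = c ∧ c ≠ "." then 1 else 0 := by
  induction n with
  | zero => simp [pvPairs]
  | succ m ih =>
    have hsplit : pvPairs (m + 1) v = pvPairs m v ++
        List.filterMap (fun j =>
          if pvColGet v j ≠ "." then some ((j : Int), pvColGet v j) else none) [m] := by
      simp [pvPairs, List.range_succ]
    rw [hsplit, List.count_append, ih]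
    by_cases hm : pvColGet v m = "."
    · have htail : List.filterMap (fun j =>
          if pvColGet v j ≠ "." then some ((j : Int), pvColGet v j) else none) [m]
          = [] := by simp [hm]
      rw [htail]
      simp only [List.count_nil, add_zero]
      have hiff : (i < m ∧ pvColGet v i = c ∧ c ≠ ".")
          ↔ (i < m + 1 ∧ pvColGet v i = c ∧ c ≠ ".") := by
        constructor
        · rintro ⟨h1, h2, h3⟩; exact ⟨by omega, h2, h3⟩
        · rintro ⟨h1, h2, h3⟩
          refine ⟨?_, h2, h3⟩
          rcases Nat.lt_succ_iff_lt_or_eq.1 h1 with h | h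
          · exact h
          · exfalso; apply h3; rw [← h2, h]; exact hm
      rw [if_congr hiff rfl rfl]
    · have htail : List.filterMap (fun j =>
          if pvColGet v j ≠ "." then some ((j : Int), pvColGet v j) else none) [m]
          = [((m : Int), pvColGet v m)] := by simp [hm]
      rw [htail, List.count_singleton]
      by_cases him : i = m
      · subst him
        have h1 : ¬ (i < i ∧ pvColGet v i = c ∧ c ≠ ".") := by
          rintro ⟨h, _⟩; omega
        rw [if_neg h1, Nat.zero_add]
        by_cases hvc : pvColGet v i = c
        · have h2 : (((i : Int), pvColGet v i) = ((i : Int), c)) := by rw [hvc]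
          have h3 : i < i + 1 ∧ pvColGet v i = c ∧ c ≠ "." :=
            ⟨Nat.lt_succ_self i, hvc, by rw [← hvc]; simpa using hm⟩
          simp [h3]
        · have h2 : ¬ (((i : Int), pvColGet v i) = ((i : Int), c)) := by simp [hvc]
          have h3 : ¬ (i < i + 1 ∧ pvColGet v i = c ∧ c ≠ ".") := by
            rintro ⟨_, h, _⟩; exact hvc h
          simp only [h2, beq_iff_eq, if_false]
          rw [if_neg h3]
      · have h2 : ¬ (((m : Int), pvColGet v m) = ((i : Int), c)) := by
          simp only [Prod.mk.injEq, not_and]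
          intro h; exfalso; exact him (by exact_mod_cast h.symm)
        have hiff : (i < m ∧ pvColGet v i = c ∧ c ≠ ".")
            ↔ (i < m + 1 ∧ pvColGet v i = c ∧ c ≠ ".") := by
          constructor
          · rintro ⟨h1, hh⟩; exact ⟨by omega, hh⟩
          · rintro ⟨h1, hh⟩; exact ⟨by omega, hh⟩
        simp only [h2, beq_iff_eq, if_false, Nat.add_zero]
        rw [if_congr hiff rfl rfl]

-- the count of (i, c) over the whole board is the count of c in column i
lemma pvFlat_count (rows : List (List String)) (n i : Nat) (c : String)
    (hi : i < n) (hc : c ≠ ".") :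
    (rows.flatMap (pvPairs n)).count ((i : Int), c)
      = ((rows.map (fun v => pvColGet v i)).filter (fun x => x ≠ ".")).count c := by
  induction rows with
  | nil => simp
  | cons v rest ih =>
    rw [List.flatMap_cons, List.count_append, ih, List.map_cons]
    have := pvPairs_count v n i c
    rw [this]
    by_cases hv : pvColGet v i = c
    · have hd : ¬ (pvColGet v i = ".") := by rw [hv]; exact hc
      rw [if_pos ⟨hi, hv, hc⟩]
      simp [hv, hc]
      omega
    · by_cases hd : pvColGet v i = "."
      · rw [if_neg (by rintro ⟨_, h, _⟩; exact hv h)]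
        simp [hd]
      · rw [if_neg (by rintro ⟨_, h, _⟩; exact hv h)]
        simp [hd, hv]

-- every pair occurring in pvFlat names a real column
lemma pvFlat_mem (board : List (List String)) (k : Int × String) (hk : k ∈ pvFlat board) :
    ∃ i : Nat, i < board.length ∧ k.2 ≠ "." ∧ k = ((i : Int), k.2) := by
  rcases List.mem_flatMap.1 hk with ⟨v, _, hv⟩
  unfold pvPairs at hv
  rcases List.mem_filterMap.1 hv with ⟨i, hi, hfi⟩
  by_cases h : pvColGet v i = "."
  · rw [if_neg (by simpa using h)] at hfi; cases hfi
  · rw [if_pos (by simpa using h)] at hfi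
    cases hfi
    exact ⟨i, List.mem_range.1 hi, by simpa using h, rfl⟩

-- the global duplicate count condition is the per-column duplicate condition
lemma pvMiddle (board : List (List String)) :
    (∃ k ∈ pvFlat board, 2 ≤ (pvFlat board).count k)
      ↔ ∃ i ∈ List.range board.length, ¬ (pvCol board i).Nodup := by
  constructor
  · rintro ⟨k, hk, h2⟩
    rcases pvFlat_mem board k hk with ⟨i, hi, hc, hkeq⟩
    refine ⟨i, List.mem_range.2 hi, ?_⟩
    rw [List.nodup_iff_count_le_one]
    push Not
    refine ⟨k.2, ?_⟩
    have := pvFlat_count board board.length i k.2 hi hc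
    rw [← pvFlat, ← hkeq] at this
    rw [pvCol]
    omega
  · rintro ⟨i, hi, hnd⟩
    rw [List.nodup_iff_count_le_one] at hnd
    push Not at hnd
    rcases hnd with ⟨c, hc2⟩
    have hcd : c ≠ "." := by
      intro h; subst h
      have : (pvCol board i).count "." = 0 := by
        rw [List.count_eq_zero]
        intro hmem
        have := List.of_mem_filter hmem
        simp at this
      omega
    have hcount := pvFlat_count board board.length i c (List.mem_range.1 hi) hcd
    rw [← pvFlat] at hcount
    rw [pvCol] at hc2
    refine ⟨((i : Int), c), ?_, by omega⟩
    rw [← List.count_pos_iff]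
    omega

-- ===== VERDICT (by name: the statement is the Claim_ definition above) =====
theorem isContainSameNumInEveryCol_spec : Claim_equal_isContainSameNumInEveryCol := by
  intro board _ _
  unfold Spec_isContainSameNumInEveryCol isContainSameNumInEveryCol isContainSameNumInEveryCol_alt
  rw [pvGo_eq_any, pvCounts_eq_counter]
  show ((List.range board.length).any fun i => decide ¬ (pvCol board i).Nodup)
      = ((PySem.Dict.counter (pvFlat board)).values.any fun m => decide (1 < m))
  have hval : (PySem.Dict.counter (pvFlat board)).values
      = (PySem.Set.ofList (pvFlat board)).map (fun k => ((pvFlat board).count k : Int)) := by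
    have := PySem.Dict.items_counter (pvFlat board)
    simp only [PySem.Dict.values, this, List.map_map]
    rfl
  rw [hval]
  rw [Bool.eq_iff_iff]
  simp only [List.any_eq_true, List.mem_map, decide_eq_true_eq]
  constructor
  · rintro ⟨i, hi, hnd⟩
    have h := (pvMiddle board).2 ⟨i, hi, hnd⟩
    rcases h with ⟨k, hk, h2⟩
    exact ⟨((pvFlat board).count k : Int), ⟨k, (PySem.Set.mem_ofList _ _).2 hk, rfl⟩, by exact_mod_cast h2⟩
  · rintro ⟨m, ⟨k, hk, rfl⟩, h1⟩
    have hk' : k ∈ pvFlat board := (PySem.Set.mem_ofList _ _).1 hk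
    have h2 : 2 ≤ (pvFlat board).count k := by exact_mod_cast h1
    exact (pvMiddle board).1 ⟨k, hk', h2⟩
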